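-- pv_equiv track=rewrite | github.com/JordanKarp/diagramless_solver | clueset_converter.py | process
-- ===== SOURCE A (Python) =====
-- def process(across_clues, down_clues):
--     # across_clues, down_clues
--     clue_set = []
--     for number in range(int(max(across_clues))):
--         if number in across_clues and number in down_clues:
--             clue_set.append('Z')
--         if number in across_clues and number not in down_clues:
--             clue_set.append('A')
--         if number not in across_clues and number in down_clues:
--             clue_set.append('D')
--     clue_set_str = ''.join(clue_set)
--     return clue_set_str
-- ===== SOURCE B (Python) =====
-- def process(across_clues, down_clues):
--     limit = int(max(across_clues))
--     nums = sorted(n for n in set(across_clues) | set(down_clues) if 0 <= n < limit)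
--     out = []
--     for n in nums:
--         if n in across_clues:
--             out.append('Z' if n in down_clues else 'A')
--         else:
--             out.append('D')
--     return ''.join(out)
-- ===== Notes on version B (the rewrite author's own statement) =====
-- stated objective: faster
-- what changed: Instead of scanning every integer 0..max(across)-1 with repeated list-membership tests, B collects the union of the two clue lists, filters to [0, max) and sorts it, then classifies only the clue numbers actually present in one pass.
import Mathlib
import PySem

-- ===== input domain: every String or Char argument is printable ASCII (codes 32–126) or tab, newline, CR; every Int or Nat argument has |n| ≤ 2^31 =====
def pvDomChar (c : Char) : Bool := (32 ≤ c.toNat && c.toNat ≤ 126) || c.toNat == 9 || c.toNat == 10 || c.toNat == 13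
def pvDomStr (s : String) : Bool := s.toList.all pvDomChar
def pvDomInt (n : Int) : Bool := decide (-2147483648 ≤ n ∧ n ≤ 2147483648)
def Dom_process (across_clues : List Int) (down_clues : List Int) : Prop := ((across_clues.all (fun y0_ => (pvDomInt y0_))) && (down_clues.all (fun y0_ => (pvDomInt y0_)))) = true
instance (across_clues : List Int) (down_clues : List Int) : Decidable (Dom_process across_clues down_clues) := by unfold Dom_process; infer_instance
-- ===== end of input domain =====

-- B replaces A's scan of every integer in range(max(across)) by sorting the union of
-- the two clue lists restricted to [0, max) and classifying only those numbers
-- (objective: faster, independent of the magnitude of max(across)).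


-- ===== PORT A =====
-- max(across_clues) raises ValueError on []; that case is excluded by Pre_process below,
-- the port returns "" there only to be total.
def process (across_clues : List Int) (down_clues : List Int) : String :=
  match PySem.List.max? across_clues (fun x => x) with
  | none => ""
  | some m =>
    let clue_set := (PySem.List.pyRange 0 m 1).foldl (fun acc number =>
      let acc := if number ∈ across_clues ∧ number ∈ down_clues then acc ++ ['Z'] else acc
      let acc := if number ∈ across_clues ∧ number ∉ down_clues then acc ++ ['A'] else acc
      if number ∉ across_clues ∧ number ∈ down_clues then acc ++ ['D'] else acc) []
    String.mk clue_set

-- ===== PORT B =====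
def process_alt (across_clues : List Int) (down_clues : List Int) : String :=
  match PySem.List.max? across_clues (fun x => x) with
  | none => ""
  | some limit =>
    let nums := PySem.List.sorted
      ((PySem.Set.union (PySem.Set.ofList across_clues) down_clues).filter
        (fun n => decide (0 ≤ n) && decide (n < limit))) (fun x => x) false
    String.mk (nums.map (fun n =>
      if n ∈ across_clues then (if n ∈ down_clues then 'Z' else 'A') else 'D'))

-- ===== PRECONDITION & SPEC =====
-- Pre_ excludes only empty across_clues, where Python's max() raises ValueError.
def Pre_process (across_clues : List Int) (down_clues : List Int) : Prop := across_clues ≠ []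
instance (across_clues : List Int) (down_clues : List Int) : Decidable (Pre_process across_clues down_clues) := by unfold Pre_process; infer_instance
def pvWitness_process : List Int × List Int := ([1, 3, 2], [2, 5])

def Spec_process (across_clues : List Int) (down_clues : List Int) (out : String) : Prop := out = process_alt across_clues down_clues
instance (across_clues : List Int) (down_clues : List Int) (out : String) : Decidable (Spec_process across_clues down_clues out) := by unfold Spec_process; infer_instance

-- ===== CLAIM (what is proved, stated in full; the proofs are below) =====
def Claim_equal_process : Prop := ∀ (across_clues : List Int) (down_clues : List Int), Dom_process across_clues down_clues → Pre_process across_clues down_clues → Spec_process across_clues down_clues (process across_clues down_clues)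

-- ===== LEMMAS AND PROOFS =====

-- the per-number emission of A's loop body, as a list of 0 or 1 chars
def pvEmit (a d : List Int) (n : Int) : List Char :=
  if n ∈ a then (if n ∈ d then ['Z'] else ['A']) else if n ∈ d then ['D'] else []

theorem pvFoldl_emit (a d : List Int) (l : List Int) (acc : List Char) :
    l.foldl (fun acc number =>
      let acc := if number ∈ a ∧ number ∈ d then acc ++ ['Z'] else acc
      let acc := if number ∈ a ∧ number ∉ d then acc ++ ['A'] else acc
      if number ∉ a ∧ number ∈ d then acc ++ ['D'] else acc) acc
    = acc ++ l.flatMap (pvEmit a d) := by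
  induction l generalizing acc with
  | nil => simp
  | cons x t ih =>
    simp only [List.foldl_cons, List.flatMap_cons, ih, pvEmit]
    by_cases hx : x ∈ a <;> by_cases hy : x ∈ d <;> simp [hx, hy]

theorem pvFlatMap_filter (a d : List Int) (l : List Int) :
    l.flatMap (pvEmit a d)
      = (l.filter (fun n => n ∈ a || n ∈ d)).map
          (fun n => if n ∈ a then (if n ∈ d then 'Z' else 'A') else 'D') := by
  induction l with
  | nil => simp
  | cons x t ih =>
    simp only [List.flatMap_cons, List.filter_cons, pvEmit]
    by_cases hx : x ∈ a <;> by_cases hy : x ∈ d <;> simp [hx, hy, ih]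

theorem pvNums_eq (a d : List Int) (m : Int) :
    PySem.List.sorted
      ((PySem.Set.union (PySem.Set.ofList a) d).filter
        (fun n => decide (0 ≤ n) && decide (n < m))) (fun x => x) false
    = (PySem.List.pyRange 0 m 1).filter (fun n => n ∈ a || n ∈ d) := by
  apply PySem.List.sorted_eq_of_perm_of_pairwise_lt
  · apply (List.perm_ext_iff_of_nodup ?_ ?_).mpr
    · intro n
      simp [List.mem_filter, PySem.Set.mem_union, PySem.Set.mem_ofList,
        PySem.List.mem_pyRange_one]
      tauto
    · exact (PySem.List.nodup_pyRange_one 0 m).filter _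
    · exact List.Nodup.filter _ (PySem.Set.nodup_union _ d (PySem.Set.nodup_ofList a))
  · exact (PySem.List.pairwise_lt_pyRange_one 0 m).filter _

theorem process_eq (a d : List Int) : process a d = process_alt a d := by
  unfold process process_alt
  cases h : PySem.List.max? a (fun x => x) with
  | none => rfl
  | some m =>
    simp only [pvFoldl_emit, List.nil_append, pvFlatMap_filter, pvNums_eq]

-- ===== VERDICT (by name: the statement is the Claim_ definition above) =====
theorem process_spec : Claim_equal_process := by
  intro a d _ _
  unfold Spec_process
  exact process_eq a d
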